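-- pv_equiv track=rewrite | github.com/sashank-kasinadhuni/CodeEvalSolutions | Easy_Happy_Numbers.py | get_Digits_Squared
-- ===== SOURCE A (Python) =====
-- def get_Digits_Squared(number):
-- 	digits = list()
-- 	if(number<10):
-- 		digits.append(number**2)
-- 		return digits
-- 	while(number>=10):
-- 		val = number%10
-- 		digits.append(val**2)
-- 		number //=10
-- 	digits.append(number**2)
-- 	return digits
-- ===== SOURCE B (Python) =====
-- def get_Digits_Squared(number):
--     if number < 10:
--         return [number**2]
--     return [int(d)**2 for d in reversed(str(number))]
-- ===== Notes on version B (the rewrite author's own statement) =====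
-- stated objective: idiomatic
-- what changed: Replaces the %10 // 10 arithmetic extraction loop with a list comprehension over the reversed decimal string of the number.
import Mathlib
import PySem

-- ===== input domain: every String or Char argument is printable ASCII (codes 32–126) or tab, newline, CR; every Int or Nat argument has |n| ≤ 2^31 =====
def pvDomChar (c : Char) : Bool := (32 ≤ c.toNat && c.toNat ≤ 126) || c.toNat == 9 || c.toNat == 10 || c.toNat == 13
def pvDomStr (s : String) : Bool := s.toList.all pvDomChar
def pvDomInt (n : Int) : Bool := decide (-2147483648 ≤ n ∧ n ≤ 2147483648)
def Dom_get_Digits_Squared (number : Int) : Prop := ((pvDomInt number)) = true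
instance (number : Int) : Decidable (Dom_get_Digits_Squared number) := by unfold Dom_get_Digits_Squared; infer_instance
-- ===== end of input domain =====

-- B replaces A's %10 // 10 arithmetic extraction loop with a comprehension over the
-- reversed decimal string of the number (objective: idiomatic; same cost).

-- ===== PORT A =====
-- A's while loop, with fuel (number.toNat suffices: number shrinks by //10 each step);
-- the fuel-0 branch is unreachable under the sufficiency invariant proved below.
def pvALoop : Nat → Int → List Int → List Int
  | 0, number, digits => digits ++ [number ^ 2]
  | fuel + 1, number, digits =>
      if number ≥ 10 then
        pvALoop fuel (PySem.Int.floordiv number 10)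
          (digits ++ [(PySem.Int.mod number 10) ^ 2])
      else digits ++ [number ^ 2]

def get_Digits_Squared (number : Int) : List Int :=
  if number < 10 then [number ^ 2]
  else pvALoop number.toNat number []

-- ===== PORT B =====
-- int(d) for a single character d, as in Source B's comprehension; the `.getD 0` default is
-- never reached on the inputs B feeds it (every char of str(number), number ≥ 10, is a digit).
def pvSqChar (c : Char) : Int := ((PySem.Int.ofStr? (String.ofList [c])).getD 0) ^ 2

def get_Digits_Squared_alt (number : Int) : List Int :=
  if number < 10 then [number ^ 2]
  else ((PySem.Int.toStr number).toList.reverse).map pvSqChar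

-- ===== PRECONDITION & SPEC =====
def Spec_get_Digits_Squared (number : Int) (out : List Int) : Prop := out = get_Digits_Squared_alt number
instance (number : Int) (out : List Int) : Decidable (Spec_get_Digits_Squared number out) := by unfold Spec_get_Digits_Squared; infer_instance

-- ===== CLAIM (what is proved, stated in full; the proofs are below) =====
def Claim_equal_get_Digits_Squared : Prop := ∀ (number : Int), Dom_get_Digits_Squared number → Spec_get_Digits_Squared number (get_Digits_Squared number)

-- ===== LEMMAS AND PROOFS =====

-- the decimal digit characters of m, most significant first
def pvDigitChars (m : Nat) : List Char :=
  if h : m < 10 then [Nat.digitChar (m % 10)]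
  else pvDigitChars (m / 10) ++ [Nat.digitChar (m % 10)]
decreasing_by exact Nat.div_lt_self (by omega) (by omega)

-- the squared decimal digits of m, least significant first
def pvSqList (m : Nat) : List Int :=
  if h : m < 10 then [((m : Int)) ^ 2]
  else (((m % 10 : Nat) : Int)) ^ 2 :: pvSqList (m / 10)
decreasing_by exact Nat.div_lt_self (by omega) (by omega)

theorem pvSqChar_digitChar (d : Nat) (hd : d < 10) :
    pvSqChar (Nat.digitChar d) = ((d : Int)) ^ 2 := by
  interval_cases d <;> decide

theorem pvToDigitsCore_eq (fuel : Nat) :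
    ∀ (n : Nat) (ds : List Char), n < fuel →
      Nat.toDigitsCore 10 fuel n ds = pvDigitChars n ++ ds := by
  induction fuel with
  | zero => intro n ds h; omega
  | succ fuel ih =>
    intro n ds h
    simp only [Nat.toDigitsCore]
    by_cases h10 : n < 10
    · have : n / 10 = 0 := Nat.div_eq_of_lt h10
      rw [if_pos this]
      conv_rhs => rw [pvDigitChars]
      rw [dif_pos h10]
      simp
    · have hne : ¬ (n / 10 = 0) := by
        intro h0; exact h10 (by omega : n < 10)
      rw [if_neg hne, ih (n / 10) _ (by
        have := Nat.div_lt_self (by omega : 0 < n) (by omega : 1 < 10); omega)]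
      conv_rhs => rw [pvDigitChars]
      rw [dif_neg h10]
      simp

theorem pvDigitChars_map (m : Nat) :
    (pvDigitChars m).reverse.map pvSqChar = pvSqList m := by
  induction m using Nat.strong_induction_on with
  | _ m ih =>
    by_cases h : m < 10
    · rw [pvDigitChars, pvSqList]
      rw [dif_pos h, dif_pos h, Nat.mod_eq_of_lt h]
      simp [pvSqChar_digitChar m h]
    · rw [pvDigitChars, pvSqList]
      rw [dif_neg h, dif_neg h]
      simp only [List.reverse_append, List.reverse_cons, List.reverse_nil,
        List.nil_append, List.map_cons, List.singleton_append]
      rw [ih (m / 10) (Nat.div_lt_self (by omega) (by omega)),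
        pvSqChar_digitChar (m % 10) (Nat.mod_lt _ (by omega))]

theorem pvALoop_eq (fuel : Nat) :
    ∀ (n : Int) (acc : List Int), 0 ≤ n → n.toNat ≤ fuel →
      pvALoop fuel n acc = acc ++ pvSqList n.toNat := by
  induction fuel with
  | zero =>
    intro n acc hn hf
    have h0 : n = 0 := by omega
    subst h0
    rw [pvSqList]; simp [pvALoop]
  | succ fuel ih =>
    intro n acc hn hf
    simp only [pvALoop]
    by_cases h10 : n ≥ 10
    · rw [if_pos h10]
      have hfd : PySem.Int.floordiv n 10 = ((n.toNat / 10 : Nat) : Int) := by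
        simp only [PySem.Int.floordiv]
        rw [Int.fdiv_eq_ediv, if_pos (Or.inl (by omega : (0:Int) ≤ 10))]
        omega
      have hfm : PySem.Int.mod n 10 = ((n.toNat % 10 : Nat) : Int) := by
        simp only [PySem.Int.mod]
        rw [Int.fmod_eq_emod, if_pos (Or.inl (by omega : (0:Int) ≤ 10))]
        omega
      rw [hfd, hfm,
        ih ((n.toNat / 10 : Nat) : Int) _ (by positivity) (by
          simp only [Int.toNat_natCast]
          have := Nat.div_lt_self (by omega : 0 < n.toNat) (by omega : 1 < 10)
          omega)]
      conv_rhs => rw [pvSqList]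
      simp only [Int.toNat_natCast]
      rw [dif_neg (by omega : ¬ n.toNat < 10)]
      simp
    · rw [if_neg h10]
      conv_rhs => rw [pvSqList]
      rw [dif_pos (by omega : n.toNat < 10)]
      have : ((n.toNat : Nat) : Int) = n := Int.toNat_of_nonneg hn
      rw [this]

-- ===== VERDICT (by name: the statement is the Claim_ definition above) =====
theorem get_Digits_Squared_spec : Claim_equal_get_Digits_Squared := by
  intro number _
  unfold Spec_get_Digits_Squared get_Digits_Squared get_Digits_Squared_alt
  by_cases h : number < 10
  · simp [h]
  · rw [if_neg h, if_neg h]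
    have hge : (10 : Int) ≤ number := by omega
    have hchars : (PySem.Int.toStr number).toList = Nat.toDigits 10 number.toNat := by
      rw [PySem.Int.toList_toStr]
      simp only [PySem.Int.toChars]
      rw [if_neg (by omega : ¬ number < 0)]
    rw [hchars]
    unfold Nat.toDigits
    rw [pvToDigitsCore_eq (number.toNat + 1) number.toNat [] (by omega)]
    rw [List.append_nil, pvDigitChars_map]
    exact pvALoop_eq number.toNat number [] (by omega) (le_refl _)
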